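-- pv_equiv track=rewrite | github.com/6puritans9/codetree-TILs | 241227/가능한 수열 중 최솟값 구하기/find-min-of-possible-series.py | backtrack
-- ===== SOURCE A (Python) =====
-- def is_duplicate(sequence):
--     length = len(sequence)
--     for sub_len in range(1, length // 2 + 1):
--         if sequence[-sub_len:] == sequence[-2 * sub_len:-sub_len]:
--             return True
--     return False
--
-- def backtrack(sequence, n):
--     if len(sequence) == n:  # Base case: sequence is complete
--         return True
--
--     for num in [4, 5, 6]:  # Try each number in lexicographical order
--         sequence.append(num)
--         if not is_duplicate(sequence):  # Check if the sequence remains valid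
--             if backtrack(sequence, n):  # Recur to complete the sequence
--                 return True
--         sequence.pop()  # Undo the choice if it leads to an invalid state
--
--     return False  # No valid number could be appended
-- ===== SOURCE B (Python) =====
-- def _has_square_suffix(seq):
--     m = len(seq)
--     k = 1
--     while 2 * k <= m:
--         if seq[m - k:] == seq[m - 2 * k:m - k]:
--             return True
--         k += 1
--     return False
--
-- def backtrack(sequence, n):
--     if len(sequence) > n:
--         return False
--     stack = [0]  # per depth: index of the next candidate of (4, 5, 6) to try
--     while stack:
--         if len(sequence) == n:
--             return True
--         i = stack[-1]
--         if i >= 3:  # candidates exhausted at this depth: backtrack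
--             stack.pop()
--             if stack:
--                 sequence.pop()
--         else:
--             sequence.append((4, 5, 6)[i])
--             if _has_square_suffix(sequence):
--                 sequence.pop()
--                 stack[-1] += 1
--             else:
--                 stack[-1] += 1
--                 stack.append(0)
--     return False
-- ===== Notes on version B (the rewrite author's own statement) =====
-- stated objective: alternative
-- what changed: A's recursive backtracking is replaced by an iterative DFS over an explicit stack of next-candidate indices, and the square-suffix test is rewritten as a while loop over nonnegative slice bounds; same 4-then-5-then-6 search order and same net in-place mutation of `sequence`.
import Mathlib
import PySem

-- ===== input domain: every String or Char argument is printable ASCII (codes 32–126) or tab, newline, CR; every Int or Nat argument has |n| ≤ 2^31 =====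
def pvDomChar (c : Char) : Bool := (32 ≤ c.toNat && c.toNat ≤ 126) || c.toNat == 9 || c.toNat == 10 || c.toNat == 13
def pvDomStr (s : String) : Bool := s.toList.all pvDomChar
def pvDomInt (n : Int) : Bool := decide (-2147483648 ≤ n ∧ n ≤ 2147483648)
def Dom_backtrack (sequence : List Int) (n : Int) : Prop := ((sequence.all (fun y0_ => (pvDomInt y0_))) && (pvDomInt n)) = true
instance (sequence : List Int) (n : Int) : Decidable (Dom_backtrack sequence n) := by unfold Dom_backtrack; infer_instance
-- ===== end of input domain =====

-- B replaces A's recursive backtracking by an iterative explicit-stack DFS (same 4-then-5-then-6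
-- order, same return value, same net in-place mutation of `sequence`); equivalence proved for the
-- RETURN value on Pre_ (len(sequence) ≤ n); where A hits RecursionError (len(sequence) > n) B
-- returns False.

-- ===== PORT A =====
-- is_duplicate: for sub_len in range(1, length//2+1): if sequence[-sub_len:] == sequence[-2*sub_len:-sub_len]: return True
def dupLoopA (s : List Int) : List Int → Bool
  | [] => false
  | k :: rest =>
    if PySem.List.slice s (some (-k)) none == PySem.List.slice s (some (-(2 * k))) (some (-k)) then
      true
    else dupLoopA s rest

def isDup (s : List Int) : Bool :=
  dupLoopA s (PySem.List.pyRange 1 (PySem.Int.floordiv (s.length : Int) 2 + 1) 1)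

-- A's recursion, made total with a fuel guard ((n - len) + 1 suffices exactly on Pre_: each
-- recursive call lengthens the sequence by one, and the recursion stops at length = n).
-- 'for num in [4,5,6]: … if …: return True … return False' is the .any fold below.
def goA : Nat → List Int → Int → Bool
  | 0, _, _ => false  -- fuel guard only; never reached when seq.length ≤ n
  | fuel + 1, seq, n =>
    if (seq.length : Int) = n then true
    else
      ([4, 5, 6] : List Int).any fun num =>
        !isDup (seq ++ [num]) && goA fuel (seq ++ [num]) n

def backtrack (sequence : List Int) (n : Int) : Bool :=
  goA ((n - sequence.length).toNat + 1) sequence n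

-- ===== PORT B =====
-- _has_square_suffix: while 2*k <= m: if seq[m-k:] == seq[m-2*k:m-k]: return True ; k += 1
theorem hasSqLoop_dec (m k : Nat) (h : 2 * k ≤ m) : m + 1 - 2 * (k + 1) < m + 1 - 2 * k := by
  omega

def hasSqLoop (seq : List Int) (m k : Nat) : Bool :=
  if h : 2 * k ≤ m then
    if PySem.List.slice seq (some ((m : Int) - k)) none ==
       PySem.List.slice seq (some ((m : Int) - 2 * k)) (some ((m : Int) - k)) then true
    else hasSqLoop seq m (k + 1)
  else false
termination_by m + 1 - 2 * k
decreasing_by exact hasSqLoop_dec m k h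

def hasSq (seq : List Int) : Bool := hasSqLoop seq seq.length 1

-- (4, 5, 6)[i]  (every use has i < 3, so the .getD default is never taken)
def candB (i : Nat) : Int := (PySem.List.pyGet? ([4, 5, 6] : List Int) (i : Int)).getD 0

-- termination measure for the while loop: weight of a stack of candidate indices
def wgtB (d : Nat) : Nat := 2 * 4 ^ d
def phiB (d i : Nat) : Nat := (3 - i) * wgtB d + 1
def muB : Nat → List Nat → Nat
  | _, [] => 0
  | d, i :: K => phiB d i + muB (d + 1) K

-- the while loop of B, with a step-count fuel guard (muB below strictly decreases at every
-- iteration, so fuel muB+1 — used by backtrack_alt — is proven sufficient; the 0 case is unreachable)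
def runB : Nat → List Int → Int → List Nat → Bool
  | 0, _, _, _ => false
  | fuel + 1, seq, n, stack =>
    match stack with
    | [] => false                                 -- while stack: … exhausted → return False
    | i :: K =>
      if (seq.length : Int) = n then true
      else if 3 ≤ i then
        match K with
        | [] => false                             -- stack.pop() empties the stack → return False
        | j :: K' => runB fuel seq.dropLast n (j :: K')
      else
        if hasSq (seq ++ [candB i]) then runB fuel seq n ((i + 1) :: K)
        else runB fuel (seq ++ [candB i]) n (0 :: (i + 1) :: K)

def backtrack_alt (sequence : List Int) (n : Int) : Bool :=
  if n < (sequence.length : Int) then false       -- if len(sequence) > n: return False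
  else runB (muB ((n - sequence.length).toNat) [0] + 1) sequence n [0]

-- ===== PRECONDITION & SPEC =====
-- Pre_ excludes len(sequence) > n, where A recurses without bound (RecursionError); B returns False there.
def Pre_backtrack (sequence : List Int) (n : Int) : Prop := (sequence.length : Int) ≤ n
instance (sequence : List Int) (n : Int) : Decidable (Pre_backtrack sequence n) := by
  unfold Pre_backtrack; infer_instance
def pvWitness_backtrack : List Int × Int := ([4], 3)

def Spec_backtrack (sequence : List Int) (n : Int) (out : Bool) : Prop := out = backtrack_alt sequence n
instance (sequence : List Int) (n : Int) (out : Bool) : Decidable (Spec_backtrack sequence n out) := by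
  unfold Spec_backtrack; infer_instance

-- ===== CLAIM (what is proved, stated in full; the proofs are below) =====
def Claim_equal_backtrack : Prop := ∀ (sequence : List Int) (n : Int), Dom_backtrack sequence n → Pre_backtrack sequence n → Spec_backtrack sequence n (backtrack sequence n)


-- ===== LEMMAS AND PROOFS =====

theorem muB_mono (K : List Nat) : ∀ {d d' : Nat}, d ≤ d' → muB d K ≤ muB d' K := by
  induction K with
  | nil => intro d d' _; simp [muB]
  | cons i K ih =>
    intro d d' h
    simp only [muB, phiB, wgtB]
    have h4 : (4:Nat) ^ d ≤ 4 ^ d' := Nat.pow_le_pow_right (by omega) h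
    have := ih (Nat.add_le_add_right h 1)
    exact Nat.add_le_add (by nlinarith) this

theorem muB_dec_pop (n : Int) (seq : List Int) (i j : Nat) (K' : List Nat) :
    muB ((n - (seq.dropLast.length : Int)).toNat) (j :: K') <
    muB ((n - (seq.length : Int)).toNat) (i :: j :: K') := by
  have h1 : muB ((n - (seq.dropLast.length : Int)).toNat) (j :: K') ≤
      muB ((n - (seq.length : Int)).toNat + 1) (j :: K') := by
    apply muB_mono
    simp only [List.length_dropLast]
    omega
  have h2 : 1 ≤ phiB ((n - (seq.length : Int)).toNat) i := by simp [phiB]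
  calc muB ((n - (seq.dropLast.length : Int)).toNat) (j :: K')
      ≤ muB ((n - (seq.length : Int)).toNat + 1) (j :: K') := h1
    _ < muB ((n - (seq.length : Int)).toNat) (i :: j :: K') := by
        simp only [muB]; omega

theorem muB_dec_adv (r i : Nat) (K : List Nat) (hi : i < 3) :
    muB r ((i + 1) :: K) < muB r (i :: K) := by
  simp only [muB]
  have hw : 1 ≤ wgtB r := by
    have := Nat.one_le_pow r 4 (by omega)
    simp only [wgtB]; omega
  have hphi : phiB r (i + 1) < phiB r i := by
    simp only [phiB]
    have h3 : 3 - i = (3 - (i + 1)) + 1 := by omega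
    rw [h3]
    nlinarith
  omega

theorem muB_dec_push (r i : Nat) (K : List Nat) (hi : i < 3) (hr : 1 ≤ r) :
    muB (r - 1) (0 :: (i + 1) :: K) < muB r (i :: K) := by
  simp only [muB, Nat.sub_add_cancel hr]
  have hpow : (4:Nat) ^ r = 4 * 4 ^ (r - 1) := by
    conv_lhs => rw [show r = (r - 1) + 1 by omega]
    ring
  have hp : 1 ≤ (4:Nat) ^ (r - 1) := Nat.one_le_pow _ _ (by omega)
  simp only [phiB, wgtB, hpow]
  interval_cases i <;> omega


theorem slice_negpair_eq (xs : List Int) (k : Nat) (hk : 0 < k) :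
    PySem.List.slice xs (some (-(2 * (k : Int)))) (some (-(k : Int))) =
    (xs.drop (xs.length - 2 * k)).take ((xs.length - k) - (xs.length - 2 * k)) := by
  have h2 : (-(2 * (k : Int))) = -((2 * k : Nat) : Int) := by push_cast; ring_nf
  rw [h2]
  simp only [PySem.List.slice]
  rw [PySem.List.clampIdx_neg_natCast xs.length (2 * k) (by omega),
      PySem.List.clampIdx_neg_natCast xs.length k hk]

theorem slice_pospair_eq (xs : List Int) (m k : Nat) (hm : m = xs.length) (hkm : 2 * k ≤ m) :
    PySem.List.slice xs (some ((m : Int) - 2 * k)) (some ((m : Int) - k)) =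
    (xs.drop (m - 2 * k)).take ((m - k) - (m - 2 * k)) := by
  have h1 : ((m : Int) - 2 * k) = ((m - 2 * k : Nat) : Int) := by omega
  have h2 : ((m : Int) - k) = ((m - k : Nat) : Int) := by omega
  rw [h1, h2, PySem.List.slice_natCast]

theorem dupLoopA_eq_hasSqLoop (s : List Int) (m : Nat) (hm : m = s.length) :
    ∀ (c k : Nat), 1 ≤ k → m / 2 + 1 - k = c →
      dupLoopA s (PySem.List.pyRange (k : Int) (((m / 2 : Nat) : Int) + 1) 1) = hasSqLoop s m k := by
  intro c
  induction c with
  | zero =>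
    intro k hk hc
    rw [PySem.List.pyRange_one_eq_nil (by push_cast; omega)]
    rw [hasSqLoop]
    simp only [dupLoopA]
    rw [dif_neg (by omega)]
  | succ c ih =>
    intro k hk hc
    rw [PySem.List.pyRange_one_cons (by push_cast; omega)]
    simp only [dupLoopA]
    rw [hasSqLoop, dif_pos (by omega : 2 * k ≤ m)]
    have e1 : PySem.List.slice s (some (-(k : Int))) none = s.drop (s.length - k) :=
      PySem.List.slice_from_neg_natCast s k hk
    have e2 : PySem.List.slice s (some ((m : Int) - k)) none = s.drop (m - k) := by
      have h1 : ((m : Int) - k) = ((m - k : Nat) : Int) := by omega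
      rw [h1, PySem.List.slice_from_natCast]
    rw [e1, e2, slice_negpair_eq s k (by omega), slice_pospair_eq s m k hm (by omega), ← hm]
    have hcast : ((k : Int) + 1) = (((k + 1 : Nat)) : Int) := by push_cast; ring
    rw [hcast]
    split
    · rfl
    · exact ih (k + 1) (by omega) (by omega)

theorem isDup_eq_hasSq (s : List Int) : isDup s = hasSq s := by
  unfold isDup hasSq
  have hdiv : PySem.Int.floordiv (s.length : Int) 2 = ((s.length / 2 : Nat) : Int) := by
    exact_mod_cast PySem.Int.floordiv_natCast s.length 2
  rw [hdiv]
  exact_mod_cast dupLoopA_eq_hasSqLoop s s.length rfl (s.length / 2) 1 (by omega) (by omega)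

-- reference search function (proof-side only)
def Sref (n : Int) (seq : List Int) : Bool :=
  if n ≤ (seq.length : Int) then decide ((seq.length : Int) = n)
  else ([4, 5, 6] : List Int).any (fun c => !hasSq (seq ++ [c]) && Sref n (seq ++ [c]))
termination_by (n - seq.length).toNat
decreasing_by
  simp only [List.length_append, List.length_cons, List.length_nil]
  push_cast
  omega

def DT (n : Int) (seq : List Int) (i : Nat) : Bool :=
  (([4, 5, 6] : List Int).drop i).any (fun c => !hasSq (seq ++ [c]) && Sref n (seq ++ [c]))

def Den (n : Int) : List Int → List Nat → Bool
  | _, [] => false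
  | seq, i :: K =>
    if (seq.length : Int) = n then true
    else if DT n seq i then true
    else
      match K with
      | [] => false
      | _ :: _ => Den n seq.dropLast K

theorem Sref_unfold (n : Int) (seq : List Int) (h : (seq.length : Int) ≤ n) :
    Sref n seq = if (seq.length : Int) = n then true else DT n seq 0 := by
  rw [Sref]
  by_cases he : (seq.length : Int) = n
  · rw [if_pos (by omega), if_pos he]
    simp [he]
  · rw [if_neg (by omega), if_neg he]
    rfl

theorem drop_cands (i : Nat) (hi : i < 3) :
    ([4, 5, 6] : List Int).drop i = candB i :: ([4, 5, 6] : List Int).drop (i + 1) := by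
  interval_cases i <;> decide

theorem DT_ge3 (n : Int) (seq : List Int) (i : Nat) (hi : 3 ≤ i) : DT n seq i = false := by
  unfold DT
  rw [List.drop_eq_nil_of_le (by simpa using hi)]
  rfl

theorem DT_step (n : Int) (seq : List Int) (i : Nat) (hi : i < 3) :
    DT n seq i = ((!hasSq (seq ++ [candB i]) && Sref n (seq ++ [candB i])) || DT n seq (i + 1)) := by
  unfold DT
  rw [drop_cands i hi]
  simp [List.any_cons]

theorem lemmaA (d : Nat) : ∀ (seq : List Int) (n : Int), (seq.length : Int) ≤ n →
    (n - (seq.length : Int)).toNat = d → goA (d + 1) seq n = Sref n seq := by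
  induction d with
  | zero =>
    intro seq n h hd
    have he : (seq.length : Int) = n := by omega
    rw [goA, if_pos he, Sref_unfold n seq h, if_pos he]
  | succ d ih =>
    intro seq n h hd
    rw [goA, Sref_unfold n seq h]
    by_cases he : (seq.length : Int) = n
    · rw [if_pos he, if_pos he]
    · rw [if_neg he, if_neg he]
      unfold DT
      rw [List.drop_zero]
      refine PySem.List.any_congr_mem ?_
      intro num _
      rw [isDup_eq_hasSq, ih (seq ++ [num]) n (by simp; omega) (by simp; omega)]

theorem lemmaB : ∀ (f : Nat) (seq : List Int) (n : Int) (stack : List Nat),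
    (seq.length : Int) ≤ n → muB ((n - (seq.length : Int)).toNat) stack < f →
    runB f seq n stack = Den n seq stack := by
  intro f
  induction f with
  | zero => intro seq n stack h hf; omega
  | succ f ih =>
    intro seq n stack h hf
    match stack with
    | [] => rfl
    | i :: K =>
      rw [runB.eq_def]; simp only []
      by_cases hn : (seq.length : Int) = n
      · simp only [if_pos hn, Den]
      · rw [if_neg hn]
        by_cases hi : 3 ≤ i
        · rw [if_pos hi]
          simp only [Den, if_neg hn, DT_ge3 n seq i hi]
          match K with
          | [] => simp
          | j :: K' =>
            change runB f seq.dropLast n (j :: K') = Den n seq.dropLast (j :: K')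
            exact ih seq.dropLast n (j :: K') (by simp only [List.length_dropLast]; omega)
              (by have := muB_dec_pop n seq i j K'; omega)
        · rw [if_neg hi]
          have hi3 : i < 3 := by omega
          by_cases hs : hasSq (seq ++ [candB i]) = true
          · rw [if_pos hs]
            rw [ih seq n ((i + 1) :: K) h (by have := muB_dec_adv ((n - (seq.length : Int)).toNat) i K hi3; omega)]
            simp only [Den, if_neg hn]
            rw [DT_step n seq i hi3, hs]
            simp
          · rw [if_neg hs]
            have hs' : hasSq (seq ++ [candB i]) = false := by simpa using hs
            have hlen : ((seq ++ [candB i]).length : Int) = (seq.length : Int) + 1 := by simp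
            have hle : (((seq ++ [candB i]).length : Int)) ≤ n := by omega
            have htn : (n - (((seq ++ [candB i]).length : Int))).toNat = (n - (seq.length : Int)).toNat - 1 := by
              omega
            rw [ih (seq ++ [candB i]) n (0 :: (i + 1) :: K) hle
                  (by rw [htn]
                      have := muB_dec_push ((n - (seq.length : Int)).toNat) i K hi3 (by omega)
                      omega)]
            simp only [Den, if_neg hn]
            rw [DT_step n seq i hi3, hs']
            have hdl : (seq ++ [candB i]).dropLast = seq := by simp
            rw [hdl]
            rw [Sref_unfold n (seq ++ [candB i]) hle]
            by_cases he : ((seq ++ [candB i]).length : Int) = n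
            · simp only [if_pos he, if_neg hn]
              simp
            · simp only [if_neg he, if_neg hn]
              by_cases h0 : DT n (seq ++ [candB i]) 0 = true <;>
                by_cases h1 : DT n seq (i + 1) = true <;>
                  simp [h0, h1]

-- ===== VERDICT (by name: the statement is the Claim_ definition above) =====
theorem backtrack_spec : Claim_equal_backtrack := by
  intro seq n _ hpre
  unfold Spec_backtrack
  unfold Pre_backtrack at hpre
  unfold backtrack backtrack_alt
  rw [if_neg (by omega : ¬ n < (seq.length : Int))]
  rw [lemmaB _ seq n [0] hpre (by omega)]
  rw [lemmaA ((n - (seq.length : Int)).toNat) seq n hpre rfl]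
  rw [Sref_unfold n seq hpre, Den]
  by_cases he : (seq.length : Int) = n
  · simp [he]
  · simp only [if_neg he]
    by_cases h0 : DT n seq 0 = true <;> simp [h0]
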